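-- pv_equiv track=rewrite | github.com/ySpac3/Sistema-de-Logins | Descriptografer.py | AllDescripto
-- ===== SOURCE A (Python) =====
-- def AllDescripto(Word, Num):
--
--     BinParts = Word.split('|')
--     IntWord = ''
--     for i in BinParts:
--         if i:
--             IntWord += str(int(i, 2)) + '|'
--     AlphabetParts = IntWord.split('|')
--     AlphabetWord = ''
--     Alphabet = ['A', 'B', 'C', 'D', 'E', 'F', 'G',
--                 'H', 'I', 'J', 'K', 'L', 'M', 'N',
--                 'O', 'P', 'Q', 'R', 'S', 'T', 'U',
--                 'V', 'W', 'X', 'Y', 'Z']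
--
--     for i in AlphabetParts:
--         if i:
--             AlphabetWord += Alphabet[int(i)] + '|'
--
--     CorrectWord = ''
--     CorrectParts = AlphabetWord.split('|')
--     for i in CorrectParts:
--         if i:
--             if i in Alphabet:
--                 CorrectWord += Alphabet[Alphabet.index(i)-Num-1]
--             else:
--                 CorrectWord += Alphabet[Alphabet.index(i)-Num-1]
--     return CorrectWord
-- ===== SOURCE B (Python) =====
-- def AllDescripto(Word, Num):
--     Alphabet = ['A', 'B', 'C', 'D', 'E', 'F', 'G',
--                 'H', 'I', 'J', 'K', 'L', 'M', 'N',
--                 'O', 'P', 'Q', 'R', 'S', 'T', 'U',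
--                 'V', 'W', 'X', 'Y', 'Z']
--     out = []
--     for p in Word.split('|'):
--         if p:
--             n = int(p, 2)
--             out.append(Alphabet[(n - Num - 1) % 26])
--     return ''.join(out)
-- ===== Notes on version B (the rewrite author's own statement) =====
-- stated objective: faster
-- what changed: A makes three sequential passes, each serializing into a '|'-joined string and re-splitting it (with int()/list.index() re-parsing at every stage); B is one fused loop over Word.split('|') that decodes each binary part and emits Alphabet[(n - Num - 1) % 26] directly into a join buffer.
import Mathlib
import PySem

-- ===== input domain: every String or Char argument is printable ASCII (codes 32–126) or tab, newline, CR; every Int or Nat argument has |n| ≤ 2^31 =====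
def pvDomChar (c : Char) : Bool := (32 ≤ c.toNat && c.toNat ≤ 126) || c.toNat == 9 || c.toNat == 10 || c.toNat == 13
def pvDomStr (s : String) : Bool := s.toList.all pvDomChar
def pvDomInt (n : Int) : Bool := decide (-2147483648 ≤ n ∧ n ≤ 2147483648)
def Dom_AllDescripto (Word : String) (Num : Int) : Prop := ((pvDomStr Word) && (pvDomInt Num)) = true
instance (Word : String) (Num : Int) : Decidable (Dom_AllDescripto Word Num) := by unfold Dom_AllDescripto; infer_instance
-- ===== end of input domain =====

-- B fuses A's three serialize-and-resplit passes into one loop decoding each binary part straight to its shifted letter (return value only; neither version mutates its arguments).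

-- ===== PORT A =====
def pvAlphabet : List String :=
  ["A", "B", "C", "D", "E", "F", "G",
   "H", "I", "J", "K", "L", "M", "N",
   "O", "P", "Q", "R", "S", "T", "U",
   "V", "W", "X", "Y", "Z"]

def AllDescripto (Word : String) (Num : Int) : String :=
  let binParts := (PySem.Str.split? Word "|").getD []
  let intWord := binParts.foldl (fun acc i =>
    if i ≠ "" then acc ++ (PySem.Int.toStr ((PySem.Int.ofStrBase? i 2).getD 0) ++ "|") else acc) ""
  let alphabetParts := (PySem.Str.split? intWord "|").getD []
  let alphabetWord := alphabetParts.foldl (fun acc i =>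
    if i ≠ "" then acc ++ ((PySem.List.pyGet? pvAlphabet ((PySem.Int.ofStr? i).getD 0)).getD "" ++ "|") else acc) ""
  let correctParts := (PySem.Str.split? alphabetWord "|").getD []
  correctParts.foldl (fun acc i =>
    if i ≠ "" then
      if pvAlphabet.contains i then
        acc ++ (PySem.List.pyGet? pvAlphabet ((((PySem.List.index? pvAlphabet i).getD 0 : Nat) : Int) - Num - 1)).getD ""
      else
        acc ++ (PySem.List.pyGet? pvAlphabet ((((PySem.List.index? pvAlphabet i).getD 0 : Nat) : Int) - Num - 1)).getD ""
    else acc) ""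

-- ===== PORT B =====
def AllDescripto_alt (Word : String) (Num : Int) : String :=
  ((PySem.Str.split? Word "|").getD []).foldl (fun acc p =>
    if p ≠ "" then
      match PySem.Int.ofStrBase? p 2 with
      | some n => acc ++ (PySem.List.pyGet? pvAlphabet (PySem.Int.mod (n - Num - 1) 26)).getD ""
      | none => acc
    else acc) ""

-- ===== PRECONDITION & SPEC =====
-- Pre_ = exactly where A returns: every nonempty '|'-segment is a valid base-2 int literal
-- whose value n keeps both of A's list indexings (Alphabet[n] and Alphabet[idx-Num-1]) in Python range.
def Pre_AllDescripto (Word : String) (Num : Int) : Prop :=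
  ∀ p ∈ (PySem.Str.split? Word "|").getD [], p ≠ "" →
    (PySem.Int.ofStrBase? p 2).isSome = true ∧
    (-26 ≤ (PySem.Int.ofStrBase? p 2).getD 0 ∧ (PySem.Int.ofStrBase? p 2).getD 0 ≤ 25 ∧
     -26 ≤ PySem.Int.mod ((PySem.Int.ofStrBase? p 2).getD 0) 26 - Num - 1 ∧
     PySem.Int.mod ((PySem.Int.ofStrBase? p 2).getD 0) 26 - Num - 1 ≤ 25)
instance (Word : String) (Num : Int) : Decidable (Pre_AllDescripto Word Num) := by
  unfold Pre_AllDescripto; infer_instance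

def pvWitness_AllDescripto : String × Int := ("1|10", 1)

def Spec_AllDescripto (Word : String) (Num : Int) (out : String) : Prop := out = AllDescripto_alt Word Num
instance (Word : String) (Num : Int) (out : String) : Decidable (Spec_AllDescripto Word Num out) := by unfold Spec_AllDescripto; infer_instance

-- ===== CLAIM (what is proved, stated in full; the proofs are below) =====
def Claim_equal_AllDescripto : Prop := ∀ (Word : String) (Num : Int), Dom_AllDescripto Word Num → Pre_AllDescripto Word Num → Spec_AllDescripto Word Num (AllDescripto Word Num)

-- ===== LEMMAS AND PROOFS =====

-- a '|'-free rendering of a string list joined by appends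
def pvJn (l : List String) : String := l.foldr (· ++ ·) ""

-- map only the head of a list of chunks
def pvMapHead (f : List Char → List Char) : List (List Char) → List (List Char)
  | [] => []
  | h :: t => f h :: t

-- structural single-char split on '|'
def pvSplitChar : List Char → List (List Char)
  | [] => [[]]
  | c :: rest => if c = '|' then [] :: pvSplitChar rest
                 else pvMapHead (fun h => c :: h) (pvSplitChar rest)

-- the integer values of the nonempty segments
def pvVals (L : List String) : List Int :=
  L.filterMap (fun p => if p = "" then none else some ((PySem.Int.ofStrBase? p 2).getD 0))

lemma pvMapHead_mapHead (f g : List Char → List Char) (l : List (List Char)) :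
    pvMapHead f (pvMapHead g l) = pvMapHead (fun h => f (g h)) l := by
  cases l <;> rfl

lemma pvMapHead_id (l : List (List Char)) : pvMapHead (fun h => h) l = l := by
  cases l <;> rfl

lemma pvMapOfToList (L : List String) : L.map (String.ofList ∘ String.toList) = L := by
  induction L with
  | nil => rfl
  | cons s t ih => simp only [List.map_cons, ih, Function.comp_apply, String.ofList_toList]

lemma pvGo_eq : ∀ (cs : List Char) (fuel : Nat) (cur : List Char) (acc : List (List Char)),
    cs.length < fuel →
    PySem.Chars.splitOn.go ['|'] fuel cs cur acc
      = acc.reverse ++ pvMapHead (fun h => cur.reverse ++ h) (pvSplitChar cs) := by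
  intro cs
  induction cs with
  | nil =>
    intro fuel cur acc hf
    cases fuel with
    | zero => omega
    | succ f => simp [PySem.Chars.splitOn.go, pvSplitChar, pvMapHead]
  | cons c rest ih =>
    intro fuel cur acc hf
    cases fuel with
    | zero => omega
    | succ f =>
      by_cases hc : c = '|'
      · subst hc
        have : PySem.Chars.splitOn.go ['|'] (f + 1) ('|' :: rest) cur acc
            = PySem.Chars.splitOn.go ['|'] f rest [] (cur.reverse :: acc) := by
          simp [PySem.Chars.splitOn.go, List.isPrefixOf]
        rw [this, ih f [] (cur.reverse :: acc) (by simp at hf; omega)]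
        simp only [pvSplitChar, List.reverse_cons, List.reverse_nil,
          List.nil_append, List.append_assoc, List.singleton_append, pvMapHead_id]
        cases pvSplitChar rest <;> simp [pvMapHead]
      · have : PySem.Chars.splitOn.go ['|'] (f + 1) (c :: rest) cur acc
            = PySem.Chars.splitOn.go ['|'] f rest (c :: cur) acc := by
          simp [PySem.Chars.splitOn.go, List.isPrefixOf, Ne.symm hc]
        rw [this, ih f (c :: cur) acc (by simp at hf; omega)]
        simp only [pvSplitChar, if_neg hc, pvMapHead_mapHead, List.reverse_cons]
        cases pvSplitChar rest <;> simp [pvMapHead]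

lemma pvSplitOn_eq (cs : List Char) :
    PySem.Chars.splitOn cs ['|'] = pvSplitChar cs := by
  have h := pvGo_eq cs (cs.length + 1) [] [] (by omega)
  unfold PySem.Chars.splitOn
  rw [h]
  simp only [List.reverse_nil, List.nil_append]
  cases pvSplitChar cs <;> rfl

lemma pvSplitChar_app : ∀ (xs rest : List Char), '|' ∉ xs →
    pvSplitChar (xs ++ '|' :: rest) = xs :: pvSplitChar rest := by
  intro xs
  induction xs with
  | nil => intro rest _; simp [pvSplitChar]
  | cons c t ih =>
    intro rest h
    have hc : c ≠ '|' := by intro e; exact h (by simp [e])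
    have ht : '|' ∉ t := by intro m; exact h (by simp [m])
    simp only [List.cons_append, pvSplitChar, if_neg hc, ih rest ht, pvMapHead]

lemma pvSplitChar_flat : ∀ (l : List (List Char)), (∀ cs ∈ l, '|' ∉ cs) →
    pvSplitChar ((l.map (· ++ ['|'])).flatten) = l ++ [[]] := by
  intro l
  induction l with
  | nil => intro _; simp [pvSplitChar]
  | cons x t ih =>
    intro h
    have hx : '|' ∉ x := h x (by simp)
    have ht : ∀ cs ∈ t, '|' ∉ cs := fun cs hcs => h cs (by simp [hcs])
    simp only [List.map_cons, List.flatten_cons, List.append_assoc, List.singleton_append]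
    rw [pvSplitChar_app x _ hx, ih ht]
    rfl

lemma pvSplit_str (s : String) :
    (PySem.Str.split? s "|").getD [] = (PySem.Chars.splitOn s.toList ['|']).map String.ofList := by
  have h := PySem.Str.split?_map s "|"
  have hsep : ("|" : String).toList = ['|'] := by decide
  rw [hsep] at h
  cases e : PySem.Str.split? s "|" with
  | none => rw [e] at h; simp [PySem.Chars.split?] at h
  | some L =>
    rw [e] at h
    simp only [Option.map_some, PySem.Chars.split?, List.isEmpty_cons, Bool.false_eq_true,
      if_false, Option.some.injEq] at h
    simp only [Option.getD_some, ← h, List.map_map]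
    exact (pvMapOfToList L).symm

lemma pvToList_jn (l : List String) :
    (pvJn l).toList = (l.map String.toList).flatten := by
  induction l with
  | nil => simp [pvJn]
  | cons s t ih => simp [pvJn, String.toList_append] at ih ⊢; exact ih

lemma pvSplit_join (L : List String) (h : ∀ s ∈ L, '|' ∉ s.toList) :
    (PySem.Str.split? (pvJn (L.map (· ++ "|"))) "|").getD [] = L ++ [""] := by
  rw [pvSplit_str, pvSplitOn_eq, pvToList_jn]
  have hbar : ("|" : String).toList = ['|'] := by decide
  have hflat : ((L.map (· ++ "|")).map String.toList).flatten
      = ((L.map String.toList).map (· ++ ['|'])).flatten := by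
    simp [List.map_map, Function.comp_def, String.toList_append, hbar]
  rw [hflat, pvSplitChar_flat (L.map String.toList)
    (by intro cs hcs; rcases List.mem_map.mp hcs with ⟨s, hs, rfl⟩; exact h s hs)]
  rw [List.map_append, List.map_map, pvMapOfToList L]
  rfl

lemma pvFoldl_skip (h : String → String) : ∀ (L : List String) (acc : String),
    L.foldl (fun a p => if p ≠ "" then a ++ h p else a) acc
      = acc ++ pvJn ((L.filter (fun p => p ≠ "")).map h) := by
  intro L
  induction L with
  | nil => intro acc; simp [pvJn, String.append_empty]
  | cons p t ih =>
    intro acc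
    simp only [List.foldl_cons]
    by_cases hp : p = ""
    · subst hp
      rw [if_neg (fun hc => hc rfl), ih acc]
      have : ("" :: t).filter (fun p => p ≠ "") = t.filter (fun p => p ≠ "") := by
        simp
      rw [this]
    · rw [if_pos hp, ih (acc ++ h p)]
      have : (p :: t).filter (fun p => p ≠ "") = p :: t.filter (fun p => p ≠ "") := by
        simp [hp]
      rw [this, List.map_cons]
      show acc ++ h p ++ pvJn _ = acc ++ (h p ++ pvJn _)
      rw [String.append_assoc]

lemma pvVals_cons_ne (p : String) (t : List String) (hp : p ≠ "") :
    pvVals (p :: t) = (PySem.Int.ofStrBase? p 2).getD 0 :: pvVals t := by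
  simp [pvVals, hp]

lemma pvFoldlB (Num : Int) : ∀ (L : List String) (acc : String),
    (∀ p ∈ L, p ≠ "" → (PySem.Int.ofStrBase? p 2).isSome = true) →
    L.foldl (fun acc p =>
      if p ≠ "" then
        match PySem.Int.ofStrBase? p 2 with
        | some n => acc ++ (PySem.List.pyGet? pvAlphabet (PySem.Int.mod (n - Num - 1) 26)).getD ""
        | none => acc
      else acc) acc
    = acc ++ pvJn ((pvVals L).map
        (fun n => (PySem.List.pyGet? pvAlphabet (PySem.Int.mod (n - Num - 1) 26)).getD "")) := by
  intro L
  induction L with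
  | nil => intro acc _; simp [pvVals, pvJn]
  | cons p t ih =>
    intro acc hH
    have ht : ∀ p ∈ t, p ≠ "" → (PySem.Int.ofStrBase? p 2).isSome = true :=
      fun q hq => hH q (by simp [hq])
    simp only [List.foldl_cons]
    by_cases hp : p = ""
    · subst hp
      rw [if_neg (fun hc => hc rfl), ih acc ht]
      have : pvVals ("" :: t) = pvVals t := by simp [pvVals]
      rw [this]
    · have hs := hH p (by simp) hp
      cases e : PySem.Int.ofStrBase? p 2 with
      | none => rw [e] at hs; simp at hs
      | some n =>
        rw [if_pos hp]
        rw [ih _ ht, pvVals_cons_ne p t hp, e]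
        simp only [Option.getD_some, List.map_cons]
        show acc ++ _ ++ pvJn _ = acc ++ (_ ++ pvJn _)
        rw [String.append_assoc]

lemma pvFilter_map_vals (g : Int → String) (L : List String) :
    (L.filter (fun p => p ≠ "")).map (fun p => g ((PySem.Int.ofStrBase? p 2).getD 0))
      = (pvVals L).map g := by
  induction L with
  | nil => simp [pvVals]
  | cons p t ih =>
    by_cases hp : p = ""
    · subst hp
      simpa [List.filter_cons, pvVals, List.filterMap_cons] using ih
    · simpa [List.filter_cons, pvVals, List.filterMap_cons, hp] using ih

lemma pvToStr_facts (n : Int) (h1 : -26 ≤ n) (h2 : n ≤ 25) :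
    PySem.Int.ofStr? (PySem.Int.toStr n) = some n ∧ PySem.Int.toStr n ≠ "" ∧
      '|' ∉ (PySem.Int.toStr n).toList := by
  interval_cases n <;> exact ⟨by decide, by decide, by decide⟩

lemma pvLetter_facts (n : Int) (_h1 : -26 ≤ n) (_h2 : n ≤ 25) :
    (PySem.List.pyGet? pvAlphabet n).getD "" ≠ "" ∧
    '|' ∉ ((PySem.List.pyGet? pvAlphabet n).getD "").toList ∧
    (PySem.List.index? pvAlphabet ((PySem.List.pyGet? pvAlphabet n).getD "")).getD 0
      = (n % 26).toNat := by
  interval_cases n <;> exact ⟨by decide, by decide, by decide⟩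

lemma pvGet_wrap (j : Int) (_h1 : -26 ≤ j) (_h2 : j ≤ 25) :
    PySem.List.pyGet? pvAlphabet j = pvAlphabet[(j % 26).toNat]? := by
  interval_cases j <;> decide

lemma pvElem_eq (n Num : Int) (_h1 : -26 ≤ n) (_h2 : n ≤ 25)
    (h3 : -26 ≤ n % 26 - Num - 1) (h4 : n % 26 - Num - 1 ≤ 25) :
    (PySem.List.pyGet? pvAlphabet ((((n % 26).toNat : Nat) : Int) - Num - 1)).getD ""
      = (PySem.List.pyGet? pvAlphabet (PySem.Int.mod (n - Num - 1) 26)).getD "" := by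
  have hm : (((n % 26).toNat : Nat) : Int) = n % 26 :=
    Int.toNat_of_nonneg (Int.emod_nonneg n (by norm_num))
  rw [hm, PySem.Int.mod_eq_emod_of_pos (by norm_num : (0:Int) < 26)]
  have e1 : -26 ≤ (n - Num - 1) % 26 := by omega
  have e2 : (n - Num - 1) % 26 ≤ 25 := by omega
  rw [pvGet_wrap _ h3 h4, pvGet_wrap _ e1 e2]
  have : (n % 26 - Num - 1) % 26 = (n - Num - 1) % 26 % 26 := by omega
  rw [this]

-- ===== VERDICT (by name: the statement is the Claim_ definition above) =====
theorem AllDescripto_spec : Claim_equal_AllDescripto := by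
  intro Word Num _hD hP
  unfold Spec_AllDescripto AllDescripto AllDescripto_alt
  simp only [ite_self]
  set P := (PySem.Str.split? Word "|").getD [] with hPdef
  -- facts about the values of the nonempty parts
  have hvals : ∀ n ∈ pvVals P, -26 ≤ n ∧ n ≤ 25 ∧
      -26 ≤ n % 26 - Num - 1 ∧ n % 26 - Num - 1 ≤ 25 := by
    intro n hn
    rcases List.mem_filterMap.mp hn with ⟨p, hp, he⟩
    by_cases hpe : p = ""
    · simp [hpe] at he
    · simp only [if_neg hpe, Option.some.injEq] at he
      rcases hP p hp hpe with ⟨_, c1, c2, c3, c4⟩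
      rw [PySem.Int.mod_eq_emod_of_pos (by norm_num : (0:Int) < 26)] at c3 c4
      subst he
      exact ⟨c1, c2, c3, c4⟩
  -- B side
  rw [pvFoldlB Num P "" (fun p hp hpe => (hP p hp hpe).1), String.empty_append]
  -- A side, pass 1
  rw [pvFoldl_skip (fun i => PySem.Int.toStr ((PySem.Int.ofStrBase? i 2).getD 0) ++ "|") P ""]
  rw [String.empty_append,
    pvFilter_map_vals (fun n => PySem.Int.toStr n ++ "|") P]
  have hmm : (pvVals P).map (fun n => PySem.Int.toStr n ++ "|")
      = ((pvVals P).map PySem.Int.toStr).map (· ++ "|") := by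
    simp [List.map_map]
  rw [hmm, pvSplit_join ((pvVals P).map PySem.Int.toStr) (by
    intro s hs
    rcases List.mem_map.mp hs with ⟨n, hn, rfl⟩
    exact (pvToStr_facts n (hvals n hn).1 (hvals n hn).2.1).2.2)]
  -- A side, pass 2
  rw [pvFoldl_skip (fun i =>
    (PySem.List.pyGet? pvAlphabet ((PySem.Int.ofStr? i).getD 0)).getD "" ++ "|") _ ""]
  rw [String.empty_append, List.filter_append]
  have hfe : ([""] : List String).filter (fun p => p ≠ "") = [] := by decide
  have hfs : ((pvVals P).map PySem.Int.toStr).filter (fun p => p ≠ "")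
      = (pvVals P).map PySem.Int.toStr := by
    apply List.filter_eq_self.mpr
    intro s hs
    rcases List.mem_map.mp hs with ⟨n, hn, rfl⟩
    simpa using (pvToStr_facts n (hvals n hn).1 (hvals n hn).2.1).2.1
  rw [hfe, hfs, List.append_nil, List.map_map]
  have hpass2 : ((pvVals P).map ((fun i =>
        (PySem.List.pyGet? pvAlphabet ((PySem.Int.ofStr? i).getD 0)).getD "" ++ "|")
        ∘ PySem.Int.toStr))
      = ((pvVals P).map (fun n => (PySem.List.pyGet? pvAlphabet n).getD "")).map (· ++ "|") := by
    rw [List.map_map]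
    apply List.map_congr_left
    intro n hn
    simp [(pvToStr_facts n (hvals n hn).1 (hvals n hn).2.1).1]
  rw [hpass2, pvSplit_join _ (by
    intro s hs
    rcases List.mem_map.mp hs with ⟨n, hn, rfl⟩
    exact (pvLetter_facts n (hvals n hn).1 (hvals n hn).2.1).2.1)]
  -- A side, pass 3
  rw [pvFoldl_skip (fun i =>
    (PySem.List.pyGet? pvAlphabet
      ((((PySem.List.index? pvAlphabet i).getD 0 : Nat) : Int) - Num - 1)).getD "") _ ""]
  rw [String.empty_append, List.filter_append, hfe, List.append_nil]
  have hfs3 : ((pvVals P).map (fun n => (PySem.List.pyGet? pvAlphabet n).getD "")).filter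
      (fun p => p ≠ "")
      = (pvVals P).map (fun n => (PySem.List.pyGet? pvAlphabet n).getD "") := by
    apply List.filter_eq_self.mpr
    intro s hs
    rcases List.mem_map.mp hs with ⟨n, hn, rfl⟩
    simpa using (pvLetter_facts n (hvals n hn).1 (hvals n hn).2.1).1
  rw [hfs3, List.map_map]
  congr 1
  apply List.map_congr_left
  intro n hn
  rcases hvals n hn with ⟨c1, c2, c3, c4⟩
  simp only [Function.comp_def, (pvLetter_facts n c1 c2).2.2]
  exact pvElem_eq n Num c1 c2 c3 c4
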